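-- pv_equiv track=rewrite | github.com/sleepwind99/programming | 9차시/CPCv0.3.5_L9v2.py | strip_nondefs
-- ===== SOURCE A (Python) =====
-- def strip_nondefs(code):
--     code_split = code.split("\n")
--     code_stripped = []
--
--     in_function=False
--     for i in code_split:
--         if i.startswith("def "): # Start function
--             in_function=True
--         elif i.startswith(" ") or i.startswith("\t"): # Indented... still in function
--             pass
--         else: # nonspace startswith... out of function now
--             in_function=False
--
--         if in_function:
--             code_stripped.append(i)
--
--     return "\n".join(code_stripped)
-- ===== SOURCE B (Python) =====
-- def strip_nondefs(code):
--     lines = code.split("\n")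
--     out = []
--     i = 0
--     n = len(lines)
--     while i < n:
--         if lines[i].startswith("def "):
--             # start of a def block: emit it, then consume the run of lines
--             # that keep the block open (further defs or indented lines)
--             out.append(lines[i])
--             i += 1
--             while i < n and (lines[i].startswith("def ")
--                              or lines[i].startswith(" ")
--                              or lines[i].startswith("\t")):
--                 out.append(lines[i])
--                 i += 1
--         else:
--             i += 1
--     return "\n".join(out)
-- ===== Notes on version B (the rewrite author's own statement) =====
-- stated objective: alternative
-- what changed: Replaces the persistent in_function boolean flag with an index-driven two-level loop: an outer scan skips lines until a function-definition header, then an inner run-consumer emits the whole block (further headers or indented lines) in one go, so no state flag is carried across iterations.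
import Mathlib
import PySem

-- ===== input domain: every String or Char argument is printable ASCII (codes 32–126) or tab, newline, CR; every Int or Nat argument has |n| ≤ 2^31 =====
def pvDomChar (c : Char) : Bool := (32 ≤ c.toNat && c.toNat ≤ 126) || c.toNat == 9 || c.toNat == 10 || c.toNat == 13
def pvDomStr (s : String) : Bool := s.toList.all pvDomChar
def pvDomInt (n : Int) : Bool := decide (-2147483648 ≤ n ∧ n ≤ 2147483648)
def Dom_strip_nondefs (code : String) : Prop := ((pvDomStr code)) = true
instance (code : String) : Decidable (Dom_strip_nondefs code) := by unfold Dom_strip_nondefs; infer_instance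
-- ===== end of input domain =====

-- B replaces A's persistent in_function flag by an index-free two-level recursion
-- (skip to a 'def ' header, then consume the whole block run); alternative decomposition, same cost.

-- ===== PORT A =====
def pvStepA (s : Bool × List String) (i : String) : Bool × List String :=
  let in_function :=
    if PySem.Str.startswith i "def " then true
    else if PySem.Str.startswith i " " || PySem.Str.startswith i "\t" then s.1
    else false
  (in_function, if in_function then s.2 ++ [i] else s.2)

def strip_nondefs (code : String) : String :=
  let code_split := (PySem.Str.split? code "\n").getD []
  let st := code_split.foldl pvStepA (false, [])
  PySem.Str.join "\n" st.2

-- ===== PORT B =====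
-- a line that keeps an open def-block open: another def, or an indented line
def pvPred (l : String) : Bool :=
  PySem.Str.startswith l "def " || PySem.Str.startswith l " " || PySem.Str.startswith l "\t"

-- inner while loop of Source B: (emitted run, remaining lines)
def pvRun : List String → List String × List String
  | [] => ([], [])
  | l :: rest =>
    if pvPred l then
      let p := pvRun rest
      (l :: p.1, p.2)
    else ([], l :: rest)

theorem pvRun_snd_length : ∀ ls : List String, (pvRun ls).2.length ≤ ls.length := by
  intro ls
  induction ls with
  | nil => simp [pvRun]
  | cons l rest ih =>
    by_cases h : pvPred l = true <;> simp [pvRun, h] <;> omega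

-- outer while loop of Source B
def pvOuter : List String → List String
  | [] => []
  | l :: rest =>
    if PySem.Str.startswith l "def " then
      l :: ((pvRun rest).1 ++ pvOuter (pvRun rest).2)
    else pvOuter rest
termination_by ls => ls.length
decreasing_by
  · have := pvRun_snd_length rest; simp; omega
  · simp

def strip_nondefs_alt (code : String) : String :=
  PySem.Str.join "\n" (pvOuter ((PySem.Str.split? code "\n").getD []))

-- ===== PRECONDITION & SPEC =====
def Spec_strip_nondefs (code : String) (out : String) : Prop := out = strip_nondefs_alt code
instance (code : String) (out : String) : Decidable (Spec_strip_nondefs code out) := by unfold Spec_strip_nondefs; infer_instance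

-- ===== CLAIM (what is proved, stated in full; the proofs are below) =====
def Claim_equal_strip_nondefs : Prop := ∀ (code : String), Dom_strip_nondefs code → Spec_strip_nondefs code (strip_nondefs code)

-- ===== LEMMAS AND PROOFS =====
-- what A's fold appends from a given flag state
def pvSpecA : Bool → List String → List String
  | _, [] => []
  | flag, l :: rest =>
    let f :=
      if PySem.Str.startswith l "def " then true
      else if PySem.Str.startswith l " " || PySem.Str.startswith l "\t" then flag
      else false
    (if f then [l] else []) ++ pvSpecA f rest

theorem pvFoldA_eq : ∀ (ls : List String) (flag : Bool) (acc : List String),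
    (ls.foldl pvStepA (flag, acc)).2 = acc ++ pvSpecA flag ls := by
  intro ls
  induction ls with
  | nil => intro flag acc; simp [pvSpecA]
  | cons l rest ih =>
    intro flag acc
    simp only [List.foldl_cons, pvStepA, pvSpecA, ih]
    split_ifs <;> simp

theorem pvSpecA_eq_outer : ∀ ls : List String,
    pvSpecA true ls = (pvRun ls).1 ++ pvOuter (pvRun ls).2 ∧ pvSpecA false ls = pvOuter ls := by
  intro ls
  induction ls with
  | nil => simp [pvSpecA, pvRun, pvOuter]
  | cons l rest ih =>
    obtain ⟨ih1, ih2⟩ := ih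
    by_cases hd : PySem.Chars.startswith l.toList ['d', 'e', 'f', ' '] = true
    · have hp : pvPred l = true := by simp [pvPred, hd]
      constructor <;> simp [pvSpecA, pvRun, pvOuter, hp, hd, ih1]
    · by_cases hs : PySem.Chars.startswith l.toList [' '] = true
      · have hp : pvPred l = true := by simp [pvPred, hs]
        constructor
        · simp [pvSpecA, pvRun, hd, hs, hp, ih1]
        · simp [pvSpecA, pvOuter, hd, hs, ih2]
      · by_cases ht : PySem.Chars.startswith l.toList ['\t'] = true
        · have hp : pvPred l = true := by simp [pvPred, ht]
          constructor
          · simp [pvSpecA, pvRun, hd, hs, ht, hp, ih1]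
          · simp [pvSpecA, pvOuter, hd, hs, ht, ih2]
        · have hp : pvPred l = false := by simp [pvPred, hd, hs, ht]
          constructor
          · simp [pvSpecA, pvRun, pvOuter, hd, hs, ht, hp, ih2]
          · simp [pvSpecA, pvOuter, hd, hs, ht, ih2]

-- ===== VERDICT (by name: the statement is the Claim_ definition above) =====
theorem strip_nondefs_spec : Claim_equal_strip_nondefs := by
  intro code _
  unfold Spec_strip_nondefs strip_nondefs strip_nondefs_alt
  simp only [pvFoldA_eq, List.nil_append, (pvSpecA_eq_outer ((PySem.Str.split? code "\n").getD [])).2]
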